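-- pv_equiv track=rewrite | github.com/kuznetsovvj/education | algorithms/codeforces/1703b.py | check
-- ===== SOURCE A (Python) =====
-- def check(w):
--     s, res = set(), 0
--     for item in w:
--         if item not in s:
--             res += 1
--             s.add(item)
--         res += 1
--     return res
-- ===== SOURCE B (Python) =====
-- def check(w):
--     # Sort-then-scan: distinct values = number of runs of equal adjacent values in sorted order.
--     l = sorted(w)
--     runs = (0 if not l else 1) + sum(1 for a, b in zip(l, l[1:]) if a != b)
--     return len(l) + runs
-- ===== Notes on version B (the rewrite author's own statement) =====
-- stated objective: alternative
-- what changed: Replaces A's single pass with a seen-set and interleaved counter by sorting the input and counting runs of equal adjacent values in one zip-scan (distinct count = run count in sorted order), added to the length.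
import Mathlib
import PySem

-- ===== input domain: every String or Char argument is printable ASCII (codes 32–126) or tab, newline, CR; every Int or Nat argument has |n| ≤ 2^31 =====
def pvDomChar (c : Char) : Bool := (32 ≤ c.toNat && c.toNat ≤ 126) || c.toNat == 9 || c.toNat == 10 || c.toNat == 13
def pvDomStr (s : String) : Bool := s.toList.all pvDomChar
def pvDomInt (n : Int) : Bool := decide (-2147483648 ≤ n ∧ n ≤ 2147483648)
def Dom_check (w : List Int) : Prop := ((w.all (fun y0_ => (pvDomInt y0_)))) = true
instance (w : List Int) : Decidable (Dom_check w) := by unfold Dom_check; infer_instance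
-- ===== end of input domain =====

-- B sorts the input and counts runs of equal adjacent values (distinct count) instead of A's one-pass seen-set loop (objective: alternative).

-- ===== PORT A =====
-- literal transliteration: loop over w with state (s, res); res += 1 once per item, and again on first occurrence
def check (w : List Int) : Int :=
  (w.foldl (fun (st : PySem.Set Int × Int) item =>
      let st' := if PySem.Set.contains st.1 item then st else (PySem.Set.add st.1 item, st.2 + 1)
      (st'.1, st'.2 + 1))
    (PySem.Set.empty, 0)).2

-- ===== PORT B =====
-- Source B: l = sorted(w); runs = (0 if not l else 1) + sum(1 for a,b in zip(l, l[1:]) if a != b)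
def check_alt (w : List Int) : Int :=
  let l := PySem.List.sorted w (fun x => x) false
  let runs : Int := (if l.isEmpty then 0 else 1) +
    ((l.zip (l.drop 1)).foldl (fun acc p => if p.1 == p.2 then acc else acc + 1) 0)
  (l.length : Int) + runs

-- ===== PRECONDITION & SPEC =====
def Spec_check (w : List Int) (out : Int) : Prop := out = check_alt w
instance (w : List Int) (out : Int) : Decidable (Spec_check w out) := by unfold Spec_check; infer_instance

-- ===== CLAIM (what is proved, stated in full; the proofs are below) =====
def Claim_equal_check : Prop := ∀ (w : List Int), Dom_check w → Spec_check w (check w)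

-- ===== LEMMAS AND PROOFS =====

-- proof-side recursive description of B's run count
def checkRuns : List Int → Int
  | [] => 0
  | [_] => 1
  | x :: y :: t => (if x == y then 0 else 1) + checkRuns (y :: t)

theorem runsFold_acc (ps : List (Int × Int)) (a : Int) :
    ps.foldl (fun acc p => if p.1 == p.2 then acc else acc + 1) a
      = a + ps.foldl (fun acc p => if p.1 == p.2 then acc else acc + 1) 0 := by
  induction ps generalizing a with
  | nil => simp
  | cons p t ih =>
    simp only [List.foldl_cons]
    by_cases h : (p.1 == p.2) = true
    · simp only [if_pos h]
      exact ih a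
    · simp only [if_neg h]
      rw [ih (a + 1), ih (0 + 1)]
      ring

-- B's zip-scan equals the recursive run count
theorem runs_zip_eq (l : List Int) :
    (if l.isEmpty then (0 : Int) else 1) +
      ((l.zip (l.drop 1)).foldl (fun acc p => if p.1 == p.2 then acc else acc + 1) 0)
      = checkRuns l := by
  induction l with
  | nil => simp [checkRuns]
  | cons x t ih =>
    cases t with
    | nil => simp [checkRuns]
    | cons y u =>
      simp only [List.isEmpty_cons, List.drop_succ_cons, List.drop_zero, List.zip_cons_cons,
        List.foldl_cons, if_neg Bool.false_ne_true, checkRuns]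
      rw [runsFold_acc]
      simp only [List.isEmpty_cons, if_neg Bool.false_ne_true, List.drop_succ_cons,
        List.drop_zero] at ih
      by_cases h : x = y
      · simp [h] at ih ⊢; omega
      · simp [h] at ih ⊢; omega

-- A's loop invariant: starting from set s and counter res, the loop returns
-- res + |w| + (|s updated with w| - |s|)
theorem check_loop_inv (w : List Int) (s : PySem.Set Int) (res : Int) :
    (w.foldl (fun (st : PySem.Set Int × Int) item =>
        let st' := if PySem.Set.contains st.1 item then st else (PySem.Set.add st.1 item, st.2 + 1)
        (st'.1, st'.2 + 1))
      (s, res)).2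
    = res + (w.length : Int) + ((PySem.Set.update s w).length : Int) - (s.length : Int) := by
  induction w generalizing s res with
  | nil => simp [PySem.Set.update]
  | cons x xs ih =>
    simp only [List.foldl_cons]
    by_cases h : PySem.Set.contains s x
    · simp only [h, if_pos]
      rw [ih]
      have hx : x ∈ s := by simpa [PySem.Set.contains] using h
      have : PySem.Set.add s x = s := by simp [PySem.Set.add, hx]
      simp [PySem.Set.update, this]
      ring
    · simp only [h, if_neg, Bool.false_eq_true, not_false_iff]
      rw [ih]
      have hx : ¬ x ∈ s := by simpa [PySem.Set.contains] using h
      have hlen : (PySem.Set.add s x).length = s.length + 1 := by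
        simp [PySem.Set.add, hx]
      simp [PySem.Set.update, hlen]
      ring

-- set(xs) has as many elements as the finset of xs's values
theorem ofList_length_toFinset (xs : List Int) :
    (PySem.Set.ofList xs).length = xs.toFinset.card := by
  have hnd : (PySem.Set.ofList xs).Nodup := PySem.Set.nodup_ofList xs
  have hmem : ∀ a : Int, a ∈ PySem.Set.ofList xs ↔ a ∈ xs := fun a => PySem.Set.mem_ofList xs a
  have : (PySem.Set.ofList xs).toFinset = xs.toFinset := by
    ext a; simp [hmem a]
  rw [← List.toFinset_card_of_nodup hnd, this]

-- on a ≤-sorted list, the run count equals the number of distinct values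
theorem checkRuns_sorted (l : List Int) (h : l.Pairwise (· ≤ ·)) :
    checkRuns l = (l.toFinset.card : Int) := by
  induction l with
  | nil => simp [checkRuns]
  | cons x t ih =>
    cases t with
    | nil => simp [checkRuns]
    | cons y u =>
      have ht : (y :: u).Pairwise (· ≤ ·) := h.of_cons
      have hxle : ∀ z ∈ y :: u, x ≤ z := by
        intro z hz; exact (List.pairwise_cons.mp h).1 z hz
      by_cases hxy : x = y
      · simp [checkRuns, hxy, ih ht]
      · have hnot : x ∉ (y :: u) := by
          intro hm
          rcases List.mem_cons.mp hm with hm | hm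
          · exact hxy hm
          · have h1 : x ≤ y := hxle y (by simp)
            have h2 : y ≤ x := (List.pairwise_cons.mp ht).1 x hm
            exact hxy (le_antisymm h1 h2)
        simp [checkRuns, hxy, ih ht]
        have hx' : x ∉ insert y u.toFinset := by simpa using hnot
        rw [Finset.card_insert_of_notMem hx']
        push_cast; ring

-- ===== VERDICT (by name: the statement is the Claim_ definition above) =====
theorem check_spec : Claim_equal_check := by
  intro w _
  unfold Spec_check check check_alt
  rw [check_loop_inv]
  show _ = ((PySem.List.sorted w (fun x => x) false).length : Int)
        + ((if (PySem.List.sorted w (fun x => x) false).isEmpty then (0 : Int) else 1) +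
           (((PySem.List.sorted w (fun x => x) false).zip
               ((PySem.List.sorted w (fun x => x) false).drop 1)).foldl
              (fun acc p => if p.1 == p.2 then acc else acc + 1) 0))
  have h1 : PySem.Set.update PySem.Set.empty w = PySem.Set.ofList w := by
    simp [PySem.Set.update, PySem.Set.ofList, PySem.Set.empty]
  have hs : (PySem.List.sorted w (fun x => x) false).Pairwise (· ≤ ·) := by
    simpa using PySem.List.sorted_pairwise w (fun x => x)
  have hperm : (PySem.List.sorted w (fun x => x) false).Perm w :=
    PySem.List.sorted_perm w (fun x => x) false
  have htf : (PySem.List.sorted w (fun x => x) false).toFinset = w.toFinset := by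
    ext a; simp [hperm.mem_iff]
  rw [h1, runs_zip_eq, checkRuns_sorted _ hs, htf, ← ofList_length_toFinset,
    PySem.List.length_sorted]
  simp [PySem.Set.empty]
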